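-- pv_equiv track=rewrite | github.com/hlxie22/teacher-rl | src/inspect_rollouts.py | _find_last_subsequence
-- ===== SOURCE A (Python) =====
-- from typing import Any, Dict, List, Optional, Sequence, Tuple
--
-- def _find_last_subsequence(haystack: Sequence[int], needle: Sequence[int]) -> int:
--     if not needle:
--         return -1
--     n = len(needle)
--     for i in range(len(haystack) - n, -1, -1):
--         if list(haystack[i : i + n]) == list(needle):
--             return i
--     return -1
-- ===== SOURCE B (Python) =====
-- def _find_last_subsequence(haystack, needle):
--     nd = list(needle)
--     if not nd:
--         return -1
--     m = len(nd)
--     last = -1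
--     alive = []  # start positions whose partial match is still alive
--     for i, x in enumerate(haystack):
--         alive.append(i)  # a new candidate match starts here
--         nxt = []
--         for s in alive:
--             if nd[i - s] == x:
--                 if i - s + 1 == m:
--                     last = s
--                 else:
--                     nxt.append(s)
--         alive = nxt
--     return last
-- ===== Notes on version B (the rewrite author's own statement) =====
-- stated objective: alternative
-- what changed: A slice-compares the whole needle at each candidate start, scanning starts backwards; B makes one forward pass over the haystack maintaining the set of live partial matches (an NFA-style multi-pointer scan) and records the start of the last completed match, never building or comparing slices.
import Mathlib
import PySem

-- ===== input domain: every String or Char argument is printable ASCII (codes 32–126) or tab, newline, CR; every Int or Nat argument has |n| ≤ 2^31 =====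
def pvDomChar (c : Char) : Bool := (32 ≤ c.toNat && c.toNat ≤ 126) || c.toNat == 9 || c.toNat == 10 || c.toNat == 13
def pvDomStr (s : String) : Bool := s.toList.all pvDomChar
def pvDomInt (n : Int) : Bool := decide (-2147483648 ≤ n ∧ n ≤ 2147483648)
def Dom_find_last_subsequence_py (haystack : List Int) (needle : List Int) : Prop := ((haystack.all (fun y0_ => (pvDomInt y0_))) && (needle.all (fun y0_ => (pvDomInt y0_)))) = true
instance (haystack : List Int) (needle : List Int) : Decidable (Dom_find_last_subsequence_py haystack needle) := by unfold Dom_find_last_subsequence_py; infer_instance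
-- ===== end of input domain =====

-- B replaces A's backward per-window slice comparison by a single forward pass maintaining live partial matches; return values proved equal.


-- ===== PORT A =====
-- the backward loop 'for i in range(len(haystack)-n, -1, -1): if … : return i' over the explicit range list
def goA (haystack needle : List Int) (n : Int) : List Int → Int
  | [] => -1
  | i :: rest =>
      if PySem.List.slice haystack (some i) (some (i + n)) == needle then i
      else goA haystack needle n rest

def find_last_subsequence_py (haystack : List Int) (needle : List Int) : Int :=
  if needle.isEmpty then -1
  else
    let n : Int := needle.length
    goA haystack needle n (PySem.List.pyRange ((haystack.length : Int) - n) (-1) (-1))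

-- ===== PORT B =====
-- inner loop 'for s in alive: if nd[i - s] == x: …' updating the state (last, nxt)
def stepInner (nd : List Int) (m x i : Int) (acc : Int × List Int) (s : Int) : Int × List Int :=
  if PySem.List.pyGet? nd (i - s) == some x then
    if i - s + 1 == m then (s, acc.2) else (acc.1, acc.2 ++ [s])
  else acc

-- one iteration of 'for i, x in enumerate(haystack)': append i to alive, run the inner loop
def stepOuter (nd : List Int) (m : Int) (st : Int × List Int) (ix : Int × Int) : Int × List Int :=
  (st.2 ++ [ix.1]).foldl (stepInner nd m ix.2 ix.1) (st.1, [])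

def find_last_subsequence_py_alt (haystack : List Int) (needle : List Int) : Int :=
  if needle.isEmpty then -1
  else ((PySem.List.enumerate haystack 0).foldl (stepOuter needle needle.length) (-1, [])).1

-- ===== PRECONDITION & SPEC =====
def Spec_find_last_subsequence_py (haystack : List Int) (needle : List Int) (out : Int) : Prop := out = find_last_subsequence_py_alt haystack needle
instance (haystack : List Int) (needle : List Int) (out : Int) : Decidable (Spec_find_last_subsequence_py haystack needle out) := by unfold Spec_find_last_subsequence_py; infer_instance

-- ===== CLAIM (what is proved, stated in full; the proofs are below) =====
def Claim_equal_find_last_subsequence_py : Prop := ∀ (haystack : List Int) (needle : List Int), Dom_find_last_subsequence_py haystack needle → Spec_find_last_subsequence_py haystack needle (find_last_subsequence_py haystack needle)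

-- ===== LEMMAS AND PROOFS =====

-- partial match of length l starting at s; full match at s
def pmatchHS (hs nd : List Int) (s l : Nat) : Bool := (hs.drop s).take l == nd.take l
def fullAt (hs nd : List Int) (s : Nat) : Bool := (hs.drop s).take nd.length == nd

-- the alive list of B after k processed elements
def aliveSpec (hs nd : List Int) (k : Nat) : List Int :=
  ((List.range k).filter (fun s => pmatchHS hs nd s (k - s) && decide (k - s < nd.length))).map (fun s : Nat => (s : Int))

-- the last variable of B after k processed elements
def lastSpec (hs nd : List Int) : Nat → Int
  | 0 => -1
  | (k+1) => if decide (nd.length ≤ k + 1) && fullAt hs nd (k + 1 - nd.length) then ((k + 1 - nd.length : Nat) : Int) else lastSpec hs nd k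

-- A's loop returns the first matching index of the scanned list (head of the filtered list), else -1
theorem goA_eq_head (haystack needle : List Int) (n : Int) (l : List Int) :
    goA haystack needle n l =
      ((l.filter (fun i => PySem.List.slice haystack (some i) (some (i + n)) == needle)).head?).getD (-1) := by
  induction l with
  | nil => rfl
  | cons i rest ih =>
      by_cases h : (PySem.List.slice haystack (some i) (some (i + n)) == needle) = true
      · simp [goA, h]
      · simp only [goA, List.filter_cons, h]
        simp [ih]

-- comparing (n+1)-prefixes = comparing n-prefixes plus the n-th entries
theorem take_succ_beq (a b : List Int) (n : Nat) :
    (a.take (n+1) == b.take (n+1)) = ((a.take n == b.take n) && (a[n]? == b[n]?)) := by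
  rw [Bool.eq_iff_iff]
  simp only [Bool.and_eq_true, beq_iff_eq]
  constructor
  · intro h
    refine ⟨?_, ?_⟩
    · have h' := congrArg (List.take n) h
      simpa [List.take_take, Nat.min_eq_left (Nat.le_succ n)] using h'
    · have h1 : (a.take (n+1))[n]? = (b.take (n+1))[n]? := by rw [h]
      rwa [List.getElem?_take_of_lt (by omega), List.getElem?_take_of_lt (by omega)] at h1
  · rintro ⟨h1, h2⟩
    rw [List.take_add_one, List.take_add_one, h1, h2]

theorem pmatch_succ (hs nd : List Int) (s l : Nat) :
    pmatchHS hs nd s (l+1) = (pmatchHS hs nd s l && (hs[s+l]? == nd[l]?)) := by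
  unfold pmatchHS
  rw [take_succ_beq, List.getElem?_drop]

theorem pmatch_zero (hs nd : List Int) (s : Nat) : pmatchHS hs nd s 0 = true := by
  simp [pmatchHS]

theorem fullAt_eq_pmatch (hs nd : List Int) (s : Nat) :
    fullAt hs nd s = pmatchHS hs nd s nd.length := by
  unfold fullAt pmatchHS
  rw [List.take_length]

-- the inner for-loop: last becomes the last completed start (default: the old last), nxt collects extended-but-incomplete starts
theorem innerFold (nd : List Int) (m x i : Int) (l : List Int) (acc : Int × List Int) :
    l.foldl (stepInner nd m x i) acc =
      (((l.filter (fun s => (PySem.List.pyGet? nd (i-s) == some x) && (i - s + 1 == m))).getLast?).getD acc.1,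
       acc.2 ++ l.filter (fun s => (PySem.List.pyGet? nd (i-s) == some x) && !(i - s + 1 == m))) := by
  induction l generalizing acc with
  | nil => simp
  | cons a t ih =>
      rw [List.foldl_cons, ih]
      by_cases h1 : (PySem.List.pyGet? nd (i-a) == some x) = true
      · by_cases h2 : (i - a + 1 == m) = true
        · simp [stepInner, h1, h2, List.getLast?_cons]
        · simp [stepInner, h1, h2]
      · simp [stepInner, h1]

-- filtering range n by a predicate true only at s0
theorem filter_range_single (c : Nat → Bool) (n s0 : Nat) (h : ∀ s, s < n → c s = true → s = s0) :
    (List.range n).filter c = if s0 < n ∧ c s0 = true then [s0] else [] := by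
  induction n with
  | zero => simp
  | succ n ih =>
      rw [List.range_succ, List.filter_append]
      have ih' := ih (fun s hs hc => h s (by omega) hc)
      by_cases hc : c n = true
      · have hn : n = s0 := h n (by omega) hc
        subst hn
        have hnil : (List.range n).filter c = [] := by
          rw [ih']
          simp only [ite_eq_right_iff]
          intro h'
          omega
        simp [hnil, hc]
      · rw [ih']
        by_cases hcs : c s0 = true
        · have hs0n : s0 ≠ n := fun e => hc (e ▸ hcs)
          simp only [List.filter_cons, List.filter_nil, hc]
          split_ifs with p q q <;> simp_all <;> omega
        · simp [hcs, hc]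

theorem enumerate_append_singleton (ys : List Int) (y : Int) : ∀ (s : Int),
    PySem.List.enumerate (ys ++ [y]) s = PySem.List.enumerate ys s ++ [((s + ys.length : Int), y)] := by
  induction ys with
  | nil => intro s; simp [PySem.List.enumerate_cons, PySem.List.enumerate_nil]
  | cons a t ih =>
      intro s
      simp only [List.cons_append, PySem.List.enumerate_cons, ih (s+1), List.length_cons]
      have h : (s + 1 + (t.length : Int)) = s + ((t.length + 1 : Nat) : Int) := by push_cast; ring
      rw [h]

theorem pmatch_append (ys : List Int) (y : Int) (nd : List Int) (s l : Nat) (h : s + l ≤ ys.length) :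
    pmatchHS (ys ++ [y]) nd s l = pmatchHS ys nd s l := by
  unfold pmatchHS
  rw [List.drop_append_of_le_length (by omega),
      List.take_append_of_le_length (by simp; omega)]

theorem aliveSpec_append (ys : List Int) (y : Int) (nd : List Int) :
    aliveSpec (ys ++ [y]) nd ys.length = aliveSpec ys nd ys.length := by
  unfold aliveSpec
  rw [List.filter_congr (fun s hsm => by
    simp only [List.mem_range] at hsm
    rw [pmatch_append _ _ _ _ _ (by omega)])]

theorem lastSpec_append (ys : List Int) (y : Int) (nd : List Int) :
    ∀ k, k ≤ ys.length → lastSpec (ys ++ [y]) nd k = lastSpec ys nd k := by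
  intro k
  induction k with
  | zero => intro _; rfl
  | succ k ih =>
      intro hk
      simp only [lastSpec]
      by_cases hm : nd.length ≤ k + 1
      · have hf : fullAt (ys ++ [y]) nd (k + 1 - nd.length) = fullAt ys nd (k + 1 - nd.length) := by
          rw [fullAt_eq_pmatch, fullAt_eq_pmatch, pmatch_append _ _ _ _ _ (by omega)]
        rw [hf, ih (by omega)]
      · simp [hm, ih (by omega)]

-- ===== the crucial single-step lemma =====
-- a full match ending at the appended element, split into its first m-1 entries plus the last one
theorem full_split (ys : List Int) (y : Int) (nd : List Int) (hle : nd.length ≤ ys.length + 1) (hm : 0 < nd.length) :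
    fullAt (ys ++ [y]) nd (ys.length + 1 - nd.length) =
      (pmatchHS (ys ++ [y]) nd (ys.length + 1 - nd.length) (nd.length - 1) && (nd[nd.length - 1]? == some y)) := by
  have h := pmatch_succ (ys ++ [y]) nd (ys.length + 1 - nd.length) (nd.length - 1)
  rw [show nd.length - 1 + 1 = nd.length from by omega,
      show (ys.length + 1 - nd.length) + (nd.length - 1) = ys.length from by omega,
      List.getElem?_concat_length] at h
  rw [fullAt_eq_pmatch, h, Bool.beq_comm]

theorem step_spec (nd : List Int) (hnd : nd ≠ []) (hs' : List Int) (ys : List Int) (y : Int)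
    (hhs : hs' = ys ++ [y]) :
    stepOuter nd nd.length (lastSpec hs' nd ys.length, aliveSpec hs' nd ys.length) (((ys.length : Int)), y)
      = (lastSpec hs' nd (ys.length + 1), aliveSpec hs' nd (ys.length + 1)) := by
  subst hhs
  have hm : 0 < nd.length := List.length_pos_iff.mpr hnd
  have hNy : (ys ++ [y])[ys.length]? = some y := List.getElem?_concat_length
  -- alive ++ [N] is the filtered range over N+1 (the fresh start N trivially matches length 0)
  have hAll : aliveSpec (ys ++ [y]) nd ys.length ++ [(ys.length : Int)] =
      ((List.range (ys.length + 1)).filter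
        (fun s => pmatchHS (ys ++ [y]) nd s (ys.length - s) && decide (ys.length - s < nd.length))).map
        (fun s : Nat => (s : Int)) := by
    rw [List.range_succ, List.filter_append, List.map_append]
    unfold aliveSpec
    congr 1
    simp [pmatch_zero, hm]
  unfold stepOuter
  rw [hAll, innerFold]
  -- push each inner-loop filter through the cast map and normalise its condition over Nat
  have hpushC :
      ((((List.range (ys.length + 1)).filter
          (fun s => pmatchHS (ys ++ [y]) nd s (ys.length - s) && decide (ys.length - s < nd.length))).map
          (fun s : Nat => (s : Int))).filter
        (fun s => (PySem.List.pyGet? nd ((ys.length : Int) - s) == some y) && ((ys.length : Int) - s + 1 == (nd.length : Int)))) =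
      ((List.range (ys.length + 1)).filter
        (fun s => (pmatchHS (ys ++ [y]) nd s (ys.length - s) && decide (ys.length - s < nd.length)) &&
          ((nd[ys.length - s]? == some y) && (decide (ys.length - s + 1 = nd.length))))).map (fun s : Nat => (s : Int)) := by
    rw [List.filter_map, List.filter_filter]
    congr 1
    apply List.filter_congr
    intro s hsm
    simp only [List.mem_range] at hsm
    have hc : ((ys.length : Int) - (s : Int)) = ((ys.length - s : Nat) : Int) := by omega
    have hb : ((((ys.length - s : Nat) : Int) + 1 == (nd.length : Int))) = (decide (ys.length - s + 1 = nd.length)) := by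
      rw [Bool.eq_iff_iff]
      simp only [beq_iff_eq, decide_eq_true_eq]
      omega
    simp only [Function.comp, hc, PySem.List.pyGet?_natCast, hb]
    rw [Bool.and_comm]
  have hpushA :
      ((((List.range (ys.length + 1)).filter
          (fun s => pmatchHS (ys ++ [y]) nd s (ys.length - s) && decide (ys.length - s < nd.length))).map
          (fun s : Nat => (s : Int))).filter
        (fun s => (PySem.List.pyGet? nd ((ys.length : Int) - s) == some y) && !((ys.length : Int) - s + 1 == (nd.length : Int)))) =
      ((List.range (ys.length + 1)).filter
        (fun s => (pmatchHS (ys ++ [y]) nd s (ys.length - s) && decide (ys.length - s < nd.length)) &&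
          ((nd[ys.length - s]? == some y) && !(decide (ys.length - s + 1 = nd.length))))).map (fun s : Nat => (s : Int)) := by
    rw [List.filter_map, List.filter_filter]
    congr 1
    apply List.filter_congr
    intro s hsm
    simp only [List.mem_range] at hsm
    have hc : ((ys.length : Int) - (s : Int)) = ((ys.length - s : Nat) : Int) := by omega
    have hb : ((((ys.length - s : Nat) : Int) + 1 == (nd.length : Int))) = (decide (ys.length - s + 1 = nd.length)) := by
      rw [Bool.eq_iff_iff]
      simp only [beq_iff_eq, decide_eq_true_eq]
      omega
    simp only [Function.comp, hc, PySem.List.pyGet?_natCast, hb]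
    rw [Bool.and_comm]
  -- the nxt list is exactly aliveSpec at N+1
  have hAlive :
      ((List.range (ys.length + 1)).filter
        (fun s => (pmatchHS (ys ++ [y]) nd s (ys.length - s) && decide (ys.length - s < nd.length)) &&
          ((nd[ys.length - s]? == some y) && !(decide (ys.length - s + 1 = nd.length))))).map (fun s : Nat => (s : Int)) =
      aliveSpec (ys ++ [y]) nd (ys.length + 1) := by
    unfold aliveSpec
    congr 1
    apply List.filter_congr
    intro s hsm
    simp only [List.mem_range] at hsm
    have hl : ys.length + 1 - s = (ys.length - s) + 1 := by omega
    rw [hl, pmatch_succ, show s + (ys.length - s) = ys.length from by omega, hNy, Bool.beq_comm]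
    rw [Bool.eq_iff_iff]
    simp only [Bool.and_eq_true, Bool.not_eq_true', decide_eq_true_eq, decide_eq_false_iff_not]
    constructor
    · rintro ⟨⟨h1, h2⟩, h3, h4⟩
      exact ⟨⟨h1, h3⟩, by omega⟩
    · rintro ⟨⟨h1, h3⟩, h2⟩
      exact ⟨⟨h1, by omega⟩, h3, by omega⟩
  -- the completed-starts list is [N+1-m] when a match ends here, else []
  have hComp :
      (List.range (ys.length + 1)).filter
        (fun s => (pmatchHS (ys ++ [y]) nd s (ys.length - s) && decide (ys.length - s < nd.length)) &&
          ((nd[ys.length - s]? == some y) && (decide (ys.length - s + 1 = nd.length)))) =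
      (if (ys.length + 1 - nd.length) < ys.length + 1 ∧
          ((pmatchHS (ys ++ [y]) nd (ys.length + 1 - nd.length) (ys.length - (ys.length + 1 - nd.length)) &&
            decide (ys.length - (ys.length + 1 - nd.length) < nd.length)) &&
           ((nd[ys.length - (ys.length + 1 - nd.length)]? == some y) &&
            (decide (ys.length - (ys.length + 1 - nd.length) + 1 = nd.length)))) = true
        then [ys.length + 1 - nd.length] else []) := by
    apply filter_range_single
    intro s hsn hcs
    simp only [Bool.and_eq_true, decide_eq_true_eq] at hcs
    omega
  rw [hpushC, hpushA, hAlive, hComp]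
  simp only [List.nil_append]
  by_cases hfin : nd.length ≤ ys.length + 1 ∧ fullAt (ys ++ [y]) nd (ys.length + 1 - nd.length) = true
  · obtain ⟨hle, hfull⟩ := hfin
    have hls : ys.length - (ys.length + 1 - nd.length) = nd.length - 1 := by omega
    have hsplit := full_split ys y nd hle hm
    rw [hfull] at hsplit
    have hconds : ((pmatchHS (ys ++ [y]) nd (ys.length + 1 - nd.length) (ys.length - (ys.length + 1 - nd.length)) &&
            decide (ys.length - (ys.length + 1 - nd.length) < nd.length)) &&
           ((nd[ys.length - (ys.length + 1 - nd.length)]? == some y) &&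
            (decide (ys.length - (ys.length + 1 - nd.length) + 1 = nd.length)))) = true := by
      rw [hls]
      simp only [Bool.and_eq_true, decide_eq_true_eq]
      have h1 := hsplit.symm
      simp only [Bool.and_eq_true] at h1
      exact ⟨⟨h1.1, by omega⟩, h1.2, by omega⟩
    rw [if_pos ⟨by omega, hconds⟩]
    simp only [List.map_cons, List.map_nil, List.getLast?_singleton, Option.getD_some]
    have hlast : lastSpec (ys ++ [y]) nd (ys.length + 1) = ((ys.length + 1 - nd.length : Nat) : Int) := by
      simp [lastSpec, hle, hfull]
    rw [hlast]
  · have hneg : ¬ ((ys.length + 1 - nd.length) < ys.length + 1 ∧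
        ((pmatchHS (ys ++ [y]) nd (ys.length + 1 - nd.length) (ys.length - (ys.length + 1 - nd.length)) &&
          decide (ys.length - (ys.length + 1 - nd.length) < nd.length)) &&
         ((nd[ys.length - (ys.length + 1 - nd.length)]? == some y) &&
          (decide (ys.length - (ys.length + 1 - nd.length) + 1 = nd.length)))) = true) := by
      rintro ⟨hlt, hc⟩
      simp only [Bool.and_eq_true, decide_eq_true_eq] at hc
      have hle : nd.length ≤ ys.length + 1 := by omega
      have hls : ys.length - (ys.length + 1 - nd.length) = nd.length - 1 := by omega
      apply hfin
      refine ⟨hle, ?_⟩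
      rw [full_split ys y nd hle hm]
      rw [hls] at hc
      simp only [Bool.and_eq_true]
      exact ⟨hc.1.1, hc.2.1⟩
    rw [if_neg hneg]
    simp only [List.map_nil, List.getLast?_nil, Option.getD_none]
    have hlast : lastSpec (ys ++ [y]) nd (ys.length + 1) = lastSpec (ys ++ [y]) nd ys.length := by
      simp only [lastSpec]
      have : ¬ (decide (nd.length ≤ ys.length + 1) && fullAt (ys ++ [y]) nd (ys.length + 1 - nd.length)) = true := by
        simp only [Bool.and_eq_true, decide_eq_true_eq]
        exact fun h => hfin ⟨h.1, h.2⟩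
      simp [this]
    rw [hlast]

theorem mainInv (nd : List Int) (hnd : nd ≠ []) (hs : List Int) :
    (PySem.List.enumerate hs 0).foldl (stepOuter nd nd.length) (-1, []) = (lastSpec hs nd hs.length, aliveSpec hs nd hs.length) := by
  induction hs using List.reverseRecOn with
  | nil => simp [PySem.List.enumerate_nil, lastSpec, aliveSpec]
  | append_singleton ys y ih =>
      rw [enumerate_append_singleton ys y 0, List.foldl_append, ih]
      simp only [List.foldl_cons, List.foldl_nil, zero_add]
      rw [← lastSpec_append ys y nd ys.length le_rfl, ← aliveSpec_append ys y nd]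
      rw [step_spec nd hnd (ys ++ [y]) ys y rfl]
      simp

-- lastSpec equals the last full-match start completed within the first k elements
theorem lastSpec_eq (hs nd : List Int) (hnd : nd ≠ []) (k : Nat) :
    lastSpec hs nd k = ((((List.range (k + 1 - nd.length)).filter (fullAt hs nd)).getLast?).map (fun s : Nat => (s : Int))).getD (-1) := by
  induction k with
  | zero =>
      have h0 : 0 + 1 - nd.length = 0 := by
        have := List.length_pos_iff.mpr hnd
        omega
      simp [lastSpec, h0]
  | succ k ih =>
      by_cases hm : nd.length ≤ k + 1
      · have : k + 1 + 1 - nd.length = (k + 1 - nd.length) + 1 := by omega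
        rw [this, List.range_succ, List.filter_append]
        by_cases hf : fullAt hs nd (k + 1 - nd.length) = true
        · simp [lastSpec, hm, hf]
        · simp only [List.filter_cons, List.filter_nil, hf]
          simp [lastSpec, hm, hf, ih]
      · have : k + 1 + 1 - nd.length = k + 1 - nd.length := by omega
        rw [this]
        simp only [lastSpec]
        simp [hm, ih]

-- A's port equals the last full-match start over the whole haystack
theorem A_char (hs nd : List Int) (hnd : ¬ nd.isEmpty) :
    find_last_subsequence_py hs nd = ((((List.range (hs.length + 1 - nd.length)).filter (fullAt hs nd)).getLast?).map (fun s : Nat => (s : Int))).getD (-1) := by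
  unfold find_last_subsequence_py
  simp only [hnd, Bool.false_eq_true, if_false]
  rw [goA_eq_head]
  have hrev : PySem.List.pyRange ((hs.length : Int) - nd.length) (-1) (-1)
      = (PySem.List.pyRange 0 ((hs.length : Int) - nd.length + 1) 1).reverse := by
    have := PySem.List.pyRange_neg_one_eq_reverse ((hs.length : Int) - nd.length) (-1)
    simpa using this
  rw [hrev, List.filter_reverse, List.head?_reverse]
  rw [PySem.List.pyRange_one 0 ((hs.length : Int) - nd.length + 1)]
  have ht : (((hs.length : Int) - nd.length + 1) - 0).toNat = hs.length + 1 - nd.length := by omega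
  rw [ht, List.filter_map, List.getLast?_map]
  have hcond : ∀ s ∈ List.range (hs.length + 1 - nd.length),
      ((fun i => PySem.List.slice hs (some i) (some (i + (nd.length : Int))) == nd) ∘ (fun k : Nat => (0 : Int) + k)) s
        = fullAt hs nd s := by
    intro s _
    simp only [Function.comp, zero_add]
    rw [PySem.List.slice_natCast_add]
    rfl
  rw [List.filter_congr hcond]
  rcases h : ((List.range (hs.length + 1 - nd.length)).filter (fullAt hs nd)).getLast? with _ | v
  · simp
  · simp [zero_add]

-- ===== VERDICT (by name: the statement is the Claim_ definition above) =====
theorem find_last_subsequence_py_spec : Claim_equal_find_last_subsequence_py := by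
  intro haystack needle _
  unfold Spec_find_last_subsequence_py
  by_cases hnd : needle.isEmpty
  · simp [find_last_subsequence_py, find_last_subsequence_py_alt, hnd]
  · have hne : needle ≠ [] := by simpa [List.isEmpty_iff] using hnd
    rw [A_char haystack needle hnd]
    unfold find_last_subsequence_py_alt
    simp only [hnd, Bool.false_eq_true, if_false]
    rw [mainInv needle hne haystack]
    rw [lastSpec_eq _ _ hne]
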